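-- pv_equiv track=rewrite | github.com/josh8551021/Calculator-PY | Calculator.py | balance_parens
-- ===== SOURCE A (Python) =====
-- def balance_parens(expr):
--     """
--     This function takes in an expression string and balances the parentheses of the expression.
--     This is done by adding parentheses to the end or start of the expression wherever necessary.
--
--     :param expr: string expression
--     :return: atoms: expression with balanced parentheses
--     """
--     atoms = expr
--
--     start_parens = 0
--     end_parens = 0
--     for i in range(len(atoms)):
--         if atoms[i] == "(":
--             end_parens += 1
--         elif atoms[i] == ")":
--             if end_parens > 0:
--                 end_parens -= 1
--             else:
--                 start_parens += 1
--
--     prepended_parens = '(' * start_parens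
--     extended_parens = ')' * end_parens
--     atoms = prepended_parens + atoms + extended_parens
--
--     return atoms
-- ===== SOURCE B (Python) =====
-- def balance_parens(expr):
--     # Rewriting approach: keep only parens, repeatedly cancel the first
--     # matched "()" pair until none remain; the irreducible remainder is
--     # ")"*a + "("*b, so prepend a '(' and append b ')'.
--     s = ''.join(c for c in expr if c in '()')
--     i = s.find('()')
--     while i != -1:
--         s = s[:i] + s[i+2:]
--         i = s.find('()')
--     return '(' * s.count(')') + expr + ')' * s.count('(')
-- ===== Notes on version B (the rewrite author's own statement) =====
-- stated objective: alternative
-- what changed: Replaces the single-pass greedy counter with a string-rewriting normal form: filter to parens only, repeatedly delete the first matched '()' pair until none remain, and pad by the counts of ')' and '(' left in the irreducible remainder.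
import Mathlib
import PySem

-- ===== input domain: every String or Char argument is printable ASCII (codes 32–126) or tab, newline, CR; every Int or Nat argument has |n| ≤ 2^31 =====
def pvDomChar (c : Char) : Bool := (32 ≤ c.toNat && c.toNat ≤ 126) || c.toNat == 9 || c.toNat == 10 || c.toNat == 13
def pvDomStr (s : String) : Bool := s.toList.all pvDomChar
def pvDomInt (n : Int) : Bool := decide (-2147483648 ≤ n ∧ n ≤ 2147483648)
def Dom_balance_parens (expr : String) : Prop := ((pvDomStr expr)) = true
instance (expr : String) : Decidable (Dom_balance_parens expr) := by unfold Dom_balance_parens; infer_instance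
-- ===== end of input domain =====

-- B cancels matched "()" pairs to a normal form instead of A's greedy counter pass; alternative algorithm, same return value.


-- ===== PORT A =====
-- A: greedy pass; end_parens clamped at 0, an unmatched ')' bumps start_parens
def stepA (p : Int × Int) (c : Char) : Int × Int :=
  if c = '(' then (p.1, p.2 + 1)
  else if c = ')' then
    (if p.2 > 0 then (p.1, p.2 - 1) else (p.1 + 1, p.2))
  else p

def balance_parens (expr : String) : String :=
  let st := expr.toList.foldl stepA (0, 0)
  String.ofList (List.replicate st.1.toNat '(') ++ expr ++ String.ofList (List.replicate st.2.toNat ')')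

-- ===== PORT B =====
-- B's loop body "i = s.find('()'); s = s[:i] + s[i+2:]": scan for the first
-- "()" occurrence and delete it (exact: same first occurrence, same removal)
def removePair : List Char → Option (List Char)
  | [] => none
  | c :: t =>
    if c = '(' ∧ t.head? = some ')' then some t.tail
    else (removePair t).map (c :: ·)

theorem removePair_length : ∀ {s t : List Char}, removePair s = some t → t.length + 2 = s.length
  | [], _, h => by simp [removePair] at h
  | c :: r, t, h => by
    simp only [removePair] at h
    split_ifs at h with hc
    · obtain ⟨rfl, hh⟩ := hc
      cases h
      cases r with
      | nil => simp at hh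
      | cons d r' => simp
    · simp only [Option.map_eq_some_iff] at h
      obtain ⟨u, hu, rfl⟩ := h
      have := removePair_length hu
      simp; omega

-- B: the while loop "while s.find('()') != -1: delete it"
def reduceAll (s : List Char) : List Char :=
  match h : removePair s with
  | some t => reduceAll t
  | none => s
termination_by s.length
decreasing_by have := removePair_length h; omega

def balance_parens_alt (expr : String) : String :=
  let s := reduceAll (expr.toList.filter (fun c => c == '(' || c == ')'))
  String.ofList (List.replicate (s.count ')') '(') ++ expr ++ String.ofList (List.replicate (s.count '(') ')')

-- ===== PRECONDITION & SPEC =====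
def Spec_balance_parens (expr : String) (out : String) : Prop := out = balance_parens_alt expr
instance (expr : String) (out : String) : Decidable (Spec_balance_parens expr out) := by unfold Spec_balance_parens; infer_instance

-- ===== CLAIM (what is proved, stated in full; the proofs are below) =====
def Claim_equal_balance_parens : Prop := ∀ (expr : String), Dom_balance_parens expr → Spec_balance_parens expr (balance_parens expr)

-- ===== LEMMAS AND PROOFS =====

theorem stepA_snd_nonneg {p : Int × Int} (h : 0 ≤ p.2) (c : Char) : 0 ≤ (stepA p c).2 := by
  unfold stepA; split_ifs <;> (try dsimp only) <;> omega

-- A's step ignores non-paren characters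
theorem foldA_filter (l : List Char) (st : Int × Int) :
    l.foldl stepA st = (l.filter (fun c => c == '(' || c == ')')).foldl stepA st := by
  induction l generalizing st with
  | nil => rfl
  | cons c t ih =>
    by_cases h : (c == '(' || c == ')') = true
    · simp [List.filter, h, ih]
    · simp only [Bool.or_eq_true, beq_iff_eq] at h
      push_neg at h
      have hid : stepA st c = st := by simp [stepA, h.1, h.2]
      simp only [List.foldl_cons, hid, List.filter_cons, h]
      simp only [Bool.or_eq_true, beq_iff_eq, h, or_self, if_neg, ih]
      split <;> simp_all [ih]

-- deleting a matched "()" does not change A's fold (second component stays ≥ 0)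
theorem foldA_removePair : ∀ {s t : List Char}, removePair s = some t → ∀ st : Int × Int, 0 ≤ st.2 →
    s.foldl stepA st = t.foldl stepA st
  | [], _, h => by simp [removePair] at h
  | c :: r, t, h => by
    intro st hst
    simp only [removePair] at h
    split_ifs at h with hc
    · obtain ⟨rfl, hh⟩ := hc
      cases h
      cases r with
      | nil => simp at hh
      | cons d r' =>
        have hd : d = ')' := by simpa using hh
        subst hd
        simp only [List.foldl_cons, List.tail_cons]
        congr 1
        have h1 : stepA st '(' = (st.1, st.2 + 1) := by simp [stepA]
        have h2 : (0:Int) < st.2 + 1 := by omega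
        rw [h1]
        simp [stepA, h2]
    · obtain ⟨u, hu, rfl⟩ := Option.map_eq_some_iff.1 h
      simp only [List.foldl_cons]
      exact foldA_removePair hu _ (stepA_snd_nonneg hst c)

theorem foldA_reduceAll (s : List Char) (st : Int × Int) (hst : 0 ≤ st.2) :
    s.foldl stepA st = (reduceAll s).foldl stepA st := by
  unfold reduceAll
  split
  · next t h =>
    rw [foldA_removePair h st hst]
    exact foldA_reduceAll t st hst
  · rfl
termination_by s.length
decreasing_by have := removePair_length (by assumption); omega

theorem removePair_none_cons {c : Char} {t : List Char} (h : removePair (c :: t) = none)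
    (hne : ¬ (c = '(' ∧ t.head? = some ')')) : removePair t = none := by
  simp only [removePair] at h
  rw [if_neg hne] at h
  simpa using h

-- in an irreducible paren string, everything after a '(' is '('
theorem allOpen_after_open : ∀ {t : List Char}, t.all (fun c => c == '(' || c == ')') →
    removePair ('(' :: t) = none → t.all (fun c => c = '(')
  | [], _, _ => rfl
  | c :: r, hall, h => by
    simp only [List.all_cons, Bool.and_eq_true, Bool.or_eq_true, beq_iff_eq] at hall
    rcases hall.1 with rfl | rfl
    · have h' : removePair ('(' :: r) = none :=
        removePair_none_cons (c := '(') (t := '(' :: r) h (by simp)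
      have hthis := allOpen_after_open hall.2 h'
      simp only [List.all_cons, hthis, Bool.and_eq_true, decide_eq_true_eq]
      exact ⟨trivial, trivial⟩
    · exfalso
      simp [removePair] at h

theorem foldA_all_open (t : List Char) (h : t.all (fun c => c = '(')) (a b : Int) :
    t.foldl stepA (a, b) = (a, b + t.length) := by
  induction t generalizing b with
  | nil => simp
  | cons c r ih =>
    simp only [List.all_cons, Bool.and_eq_true, decide_eq_true_eq] at h
    obtain ⟨rfl, hr⟩ := h
    simp only [List.foldl_cons]
    rw [show stepA (a, b) '(' = (a, b + 1) by simp [stepA]]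
    rw [ih hr]
    simp
    omega

-- A's fold over an irreducible paren string counts its ')' then its '('
theorem foldA_normal : ∀ (s : List Char), s.all (fun c => c == '(' || c == ')') →
    removePair s = none → ∀ a : Int,
    s.foldl stepA (a, 0) = (a + s.count ')', (s.count '(' : Int))
  | [], _, _, a => by simp
  | c :: t, hall, h, a => by
    simp only [List.all_cons, Bool.and_eq_true, Bool.or_eq_true, beq_iff_eq] at hall
    rcases hall.1 with rfl | rfl
    · -- head '(' : the tail is all '('
      have hopen := allOpen_after_open hall.2 h
      simp only [List.foldl_cons]
      rw [show stepA (a, 0) '(' = (a, (1 : Int)) by simp [stepA]]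
      rw [foldA_all_open t hopen a 1]
      have hc0 : t.count ')' = 0 := by
        rw [List.count_eq_zero]
        intro hmem
        have := List.all_eq_true.1 hopen _ hmem
        simp at this
      have hc1 : t.count '(' = t.length :=
        List.count_eq_length.2 (fun x hx => by
          have := List.all_eq_true.1 hopen _ hx; simp_all)
      simp only [List.count_cons, hc0, hc1, Prod.mk.injEq]
      constructor <;> [skip; push_cast] <;> simp <;> omega
    · -- head ')'
      have h' : removePair t = none := removePair_none_cons h (by simp)
      simp only [List.foldl_cons]
      rw [show stepA (a, 0) ')' = (a + 1, 0) by simp [stepA]]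
      rw [foldA_normal t hall.2 h' (a + 1)]
      simp only [List.count_cons, Prod.mk.injEq]
      constructor <;> [push_cast; simp] <;> simp <;> omega

theorem removePair_reduceAll (s : List Char) : removePair (reduceAll s) = none := by
  unfold reduceAll
  split
  · next t h => exact removePair_reduceAll t
  · assumption
termination_by s.length
decreasing_by have := removePair_length (by assumption); omega

theorem removePair_all {p : Char → Bool} : ∀ {s t : List Char}, removePair s = some t →
    s.all p = true → t.all p = true
  | [], _, h, _ => by simp [removePair] at h
  | c :: r, t, h, hall => by
    simp only [removePair] at h
    have hall' : p c = true ∧ r.all p = true := by simpa using hall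
    split_ifs at h with hc
    · obtain ⟨rfl, hh⟩ := hc
      cases h
      cases r with
      | nil => simp at hh
      | cons d r' =>
        simpa using (by simpa using hall'.2 : p d = true ∧ r'.all p = true).2
    · obtain ⟨u, hu, rfl⟩ := Option.map_eq_some_iff.1 h
      simp only [List.all_cons, Bool.and_eq_true]
      exact ⟨hall'.1, removePair_all hu hall'.2⟩

theorem reduceAll_all {p : Char → Bool} (s : List Char) (h : s.all p = true) :
    (reduceAll s).all p = true := by
  unfold reduceAll
  split
  · next t ht => exact reduceAll_all t (removePair_all ht h)
  · assumption
termination_by s.length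
decreasing_by have := removePair_length (by assumption); omega

-- ===== VERDICT =====
theorem balance_parens_spec : Claim_equal_balance_parens := by
  intro expr _
  unfold Spec_balance_parens balance_parens balance_parens_alt
  set f := expr.toList.filter (fun c => c == '(' || c == ')') with hf
  set s := reduceAll f with hs
  have hallf : f.all (fun c => c == '(' || c == ')') = true := by
    rw [hf]
    exact List.all_eq_true.2 (fun x hx => (List.mem_filter.1 hx).2)
  have hall : s.all (fun c => c == '(' || c == ')') = true := by
    rw [hs]; exact reduceAll_all f hallf
  have hfold : expr.toList.foldl stepA (0, 0) = ((s.count ')' : Int), (s.count '(' : Int)) := by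
    rw [foldA_filter, ← hf, foldA_reduceAll f (0, 0) le_rfl, ← hs,
        foldA_normal s hall (by rw [hs]; exact removePair_reduceAll f) 0]
    simp
  simp [hfold]
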